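-- pv_equiv track=rewrite | github.com/WeMakeGood/makegood-skills | plugins/web-design/skills/designing-websites/scripts/create_source_index.py | extract_brief_description
-- ===== SOURCE A (Python) =====
-- def extract_brief_description(content: str) -> str:
--     """Extract a brief description from the document."""
--     for line in content.split('\n')[:20]:
--         if line.startswith('# '):
--             return line[2:].strip()[:80]
--     for line in content.split('\n')[:10]:
--         stripped = line.strip()
--         if stripped and not stripped.startswith('#') and not stripped.startswith('---'):
--             return stripped[:80]
--     return ""
-- ===== SOURCE B (Python) =====
-- def extract_brief_description(content: str) -> str:
--     """Single pass over the first 20 lines; an early '# ' header returns at once,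
--     the first plain-text line (index < 10) is remembered as a fallback."""
--     pending = None
--     for i, line in enumerate(content.split('\n')[:20]):
--         if line.startswith('# '):
--             return line[2:].strip()[:80]
--         if pending is None and i < 10:
--             stripped = line.strip()
--             if stripped and not stripped.startswith('#') and not stripped.startswith('---'):
--                 pending = stripped
--     return pending[:80] if pending is not None else ""
-- ===== Notes on version B (the rewrite author's own statement) =====
-- stated objective: simpler
-- what changed: Merged A's two sequential scans over the split line list into one enumerate-driven pass that returns immediately on a markdown header line and carries the first eligible plain-text line (index below 10) as a pending fallback, truncated only at the end.
import Mathlib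
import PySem

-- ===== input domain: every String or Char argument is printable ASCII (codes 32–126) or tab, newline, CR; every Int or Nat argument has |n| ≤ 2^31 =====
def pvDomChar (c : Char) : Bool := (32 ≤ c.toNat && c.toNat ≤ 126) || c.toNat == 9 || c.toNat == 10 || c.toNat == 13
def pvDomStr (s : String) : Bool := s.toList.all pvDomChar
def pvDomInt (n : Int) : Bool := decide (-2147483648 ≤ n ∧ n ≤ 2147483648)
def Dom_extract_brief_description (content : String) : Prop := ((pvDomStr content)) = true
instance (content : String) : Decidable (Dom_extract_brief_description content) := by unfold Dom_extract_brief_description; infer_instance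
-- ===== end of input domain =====

-- B merges A's two sequential scans into one state-carrying pass (simpler, one split instead of two).


-- ===== PORT A =====
-- content.split('\n'): '\n' is non-empty so split? always returns some
def pvLines (content : String) : List String := (PySem.Str.split? content "\n").getD []

-- first loop of A: first line starting with '# ', already transformed as A returns it
def pvHeadScan : List String → Option String
  | [] => none
  | l :: ls =>
    if PySem.Str.startswith l "# " then
      some (PySem.Str.slice (PySem.Str.strip (PySem.Str.slice l (some 2) none)) none (some 80))
    else pvHeadScan ls

-- second loop of A: first non-empty stripped line not starting with '#' or '---'
def pvTextScan : List String → Option String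
  | [] => none
  | l :: ls =>
    let stripped := PySem.Str.strip l
    if stripped ≠ "" ∧ ¬ PySem.Str.startswith stripped "#" ∧ ¬ PySem.Str.startswith stripped "---" then
      some (PySem.Str.slice stripped none (some 80))
    else pvTextScan ls

def extract_brief_description (content : String) : String :=
  match pvHeadScan (PySem.List.slice (pvLines content) none (some 20)) with
  | some s => s
  | none =>
    match pvTextScan (PySem.List.slice (pvLines content) none (some 10)) with
    | some s => s
    | none => ""

-- ===== PORT B =====
-- single pass: i is the enumerate index, pending the remembered plain-text candidate
def pvScan : Nat → List String → Option String → String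
  | _, [], pending =>
    match pending with
    | some t => PySem.Str.slice t none (some 80)
    | none => ""
  | i, l :: ls, pending =>
    if PySem.Str.startswith l "# " then
      PySem.Str.slice (PySem.Str.strip (PySem.Str.slice l (some 2) none)) none (some 80)
    else if pending = none ∧ i < 10 then
      let stripped := PySem.Str.strip l
      if stripped ≠ "" ∧ ¬ PySem.Str.startswith stripped "#" ∧ ¬ PySem.Str.startswith stripped "---" then
        pvScan (i + 1) ls (some stripped)
      else pvScan (i + 1) ls pending
    else pvScan (i + 1) ls pending

def extract_brief_description_alt (content : String) : String :=
  pvScan 0 (PySem.List.slice (pvLines content) none (some 20)) none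

-- ===== PRECONDITION & SPEC =====
def Spec_extract_brief_description (content : String) (out : String) : Prop := out = extract_brief_description_alt content
instance (content : String) (out : String) : Decidable (Spec_extract_brief_description content out) := by unfold Spec_extract_brief_description; infer_instance

-- ===== CLAIM (what is proved, stated in full; the proofs are below) =====
def Claim_equal_extract_brief_description : Prop := ∀ (content : String), Dom_extract_brief_description content → Spec_extract_brief_description content (extract_brief_description content)

-- ===== LEMMAS AND PROOFS =====

-- once a pending text is stored, only a header can override it
theorem pvScan_some (ls : List String) : ∀ (i : Nat) (p : String),
    pvScan i ls (some p) = ((pvHeadScan ls).getD (PySem.Str.slice p none (some 80))) := by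
  induction ls with
  | nil => intro i p; simp [pvScan, pvHeadScan]
  | cons l ls ih =>
    intro i p
    by_cases h : PySem.Chars.startswith l.toList ['#', ' '] = true
    · simp [pvScan, pvHeadScan, h]
    · simp [pvScan, pvHeadScan, h, ih]

-- with no pending text yet at index i, the single pass is: header wins, else first text among the next (10 - i) lines
theorem pvScan_none (ls : List String) : ∀ (i : Nat),
    pvScan i ls none =
      match pvHeadScan ls with
      | some s => s
      | none => ((pvTextScan (ls.take (10 - i))).getD "") := by
  induction ls with
  | nil => intro i; simp [pvScan, pvHeadScan, pvTextScan]
  | cons l ls ih =>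
    intro i
    by_cases h : PySem.Chars.startswith l.toList ['#', ' '] = true
    · simp [pvScan, pvHeadScan, h]
    · by_cases hi : i < 10
      · have htake : (l :: ls).take (10 - i) = l :: ls.take (10 - (i + 1)) := by
          have h10 : 10 - i = (10 - (i + 1)) + 1 := by omega
          rw [h10]; rfl
        rw [htake]
        by_cases hg : ¬PySem.Str.strip l = "" ∧
            PySem.Chars.startswith (PySem.Chars.strip l.toList) ['#'] = false ∧
            PySem.Chars.startswith (PySem.Chars.strip l.toList) ['-', '-', '-'] = false
        · simp [pvScan, pvHeadScan, pvTextScan, h, hi, hg, pvScan_some]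
          cases pvHeadScan ls <;> simp
        · simp [pvScan, pvHeadScan, pvTextScan, h, hi, hg, ih]
      · have htake : 10 - i = 0 := by omega
        have htake' : 10 - (i + 1) = 0 := by omega
        simp only [pvScan]
        rw [ih, htake, htake']
        simp [pvHeadScan, h, hi]

theorem take_ten_of_take_twenty (ls : List String) : (ls.take 20).take 10 = ls.take 10 := by
  rw [List.take_take]; norm_num

-- ===== VERDICT (by name: the statement is the Claim_ definition above) =====
theorem extract_brief_description_spec : Claim_equal_extract_brief_description := by
  intro content _
  unfold Spec_extract_brief_description extract_brief_description extract_brief_description_alt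
  rw [PySem.List.slice_to _ (by norm_num : (0:Int) ≤ 20), PySem.List.slice_to _ (by norm_num : (0:Int) ≤ 10), pvScan_none]
  norm_num [take_ten_of_take_twenty]
  cases hh : pvHeadScan ((pvLines content).take 20) with
  | some s => simp [hh]
  | none =>
    cases ht : pvTextScan ((pvLines content).take 10) with
    | some s => simp [hh, ht, take_ten_of_take_twenty]
    | none => simp [hh, ht, take_ten_of_take_twenty]
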